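-- pv_equiv track=rewrite | github.com/sarishtshreshth0/plag_extract | Project_CodeNet_Python800/p03212/s979117487.py | generate
-- ===== SOURCE A (Python) =====
-- import collections
--
-- def generate(n):
--     _list = []
--     queue = collections.deque([0])
--     while queue:
--         _temp = queue.popleft()
--         if _temp <= n and '3' in str(_temp) and '7' in str(_temp) and '5' in str(_temp):
--             _list.append(_temp)
--         if len(str(_temp)) > 9:
--             break
--         queue.append(_temp * 10 + 7)
--         queue.append(_temp * 10 + 5)
--         queue.append(_temp * 10 + 3)
--     return _list
-- ===== SOURCE B (Python) =====
-- def generate(n):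
--     res = []
--     for L in range(1, 10):
--         for k in range(3 ** L):
--             x, p, t = 0, 1, k
--             s7 = s5 = s3 = False
--             for _ in range(L):
--                 t, r = divmod(t, 3)
--                 x += (7 - 2 * r) * p
--                 p *= 10
--                 if r == 0:
--                     s7 = True
--                 elif r == 1:
--                     s5 = True
--                 else:
--                     s3 = True
--             if x <= n and s7 and s5 and s3:
--                 res.append(x)
--     return res
-- ===== Notes on version B (the rewrite author's own statement) =====
-- stated objective: alternative
-- what changed: Replaced the deque-BFS with string membership tests by base-3 unranking: for each length L every rank k < 3**L is decoded arithmetically (divmod by 3) into the digits 7/5/3 while three boolean presence flags are maintained, so the queue and all str() conversions disappear.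
import Mathlib
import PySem

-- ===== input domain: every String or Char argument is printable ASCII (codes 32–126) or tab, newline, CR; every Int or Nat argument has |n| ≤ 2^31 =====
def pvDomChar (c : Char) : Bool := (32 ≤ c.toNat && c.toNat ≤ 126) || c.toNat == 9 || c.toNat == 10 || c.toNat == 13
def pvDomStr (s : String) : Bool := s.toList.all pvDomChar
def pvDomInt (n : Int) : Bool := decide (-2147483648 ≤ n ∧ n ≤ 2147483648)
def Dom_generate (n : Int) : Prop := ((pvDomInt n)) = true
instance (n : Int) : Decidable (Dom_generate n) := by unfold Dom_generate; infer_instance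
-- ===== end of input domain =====

-- B replaces A's deque-BFS with string membership tests by base-3 unranking: for each length L it
-- decodes every rank k < 3^L arithmetically into digits 7/5/3 while tracking three presence flags,
-- so no queue and no string conversion exist at all; a different algorithm of similar cost.

-- ===== PORT A =====
-- the test A spells out: '_temp <= n and '3' in str(_temp) and '7' in str(_temp) and '5' in str(_temp)'
def pvP (n x : Int) : Bool :=
  decide (x ≤ n) && PySem.Str.isIn "3" (PySem.Int.toStr x) &&
    PySem.Str.isIn "7" (PySem.Int.toStr x) && PySem.Str.isIn "5" (PySem.Int.toStr x)

-- collections.deque ported as the standard two-list queue (front, back): popleft takes from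
-- front (flipping back.reverse in when front is empty), append conses onto back — O(1) deque
-- operations with exactly deque's element order.
def pvPop : List Int × List Int → Option (Int × List Int × List Int)
  | ([], []) => none
  | ([], back) =>
    match back.reverse with
    | [] => none
    | t :: front => some (t, front, [])
  | (t :: front, back) => some (t, front, back)

-- while queue: pop, maybe append, break past 9 digits, push the three children.
-- The loop pops at most 29525 elements before the break fires, so the fuel is a pure totality guard.
def generateLoop (n : Int) : Nat → List Int × List Int → List Int → List Int
  | 0, _, acc => acc
  | fuel + 1, q, acc =>
    match pvPop q with
    | none => acc
    | some (t, front, back) =>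
      let acc' := if pvP n t then acc ++ [t] else acc
      if PySem.Str.len (PySem.Int.toStr t) > 9 then acc'
      else generateLoop n fuel (front, (t * 10 + 3) :: (t * 10 + 5) :: (t * 10 + 7) :: back) acc'

def generate (n : Int) : List Int := generateLoop n 29525 ([0], []) []

-- ===== PORT B =====
-- the body of 'for _ in range(L)': t, r = divmod(t, 3); x += (7-2*r)*p; p *= 10; set the flag for r
def altStep (st : Int × Int × Int × Bool × Bool × Bool) (_ : Int) :
    Int × Int × Int × Bool × Bool × Bool :=
  match st with
  | (x, p, t, s7, s5, s3) =>
    let t' := PySem.Int.floordiv t 3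
    let r := PySem.Int.mod t 3
    let x' := x + (7 - 2 * r) * p
    let p' := p * 10
    if r = 0 then (x', p', t', true, s5, s3)
    else if r = 1 then (x', p', t', s7, true, s3)
    else (x', p', t', s7, s5, true)

-- for L in range(1,10): for k in range(3**L): decode k, then filter on x <= n and the three flags
def generate_alt (n : Int) : List Int :=
  (PySem.List.pyRange 1 10 1).foldl (fun res L =>
    (PySem.List.pyRange 0 ((3 : Int) ^ L.toNat) 1).foldl (fun res k =>
      match (PySem.List.pyRange 0 L 1).foldl altStep (0, 1, k, false, false, false) with
      | (x, _, _, s7, s5, s3) =>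
        if x ≤ n ∧ s7 ∧ s5 ∧ s3 then res ++ [x] else res) res) []

-- ===== PRECONDITION & SPEC =====
def Spec_generate (n : Int) (out : List Int) : Prop := out = generate_alt n
instance (n : Int) (out : List Int) : Decidable (Spec_generate n out) := by unfold Spec_generate; infer_instance

-- ===== CLAIM (what is proved, stated in full; the proofs are below) =====
def Claim_equal_generate : Prop := ∀ (n : Int), Dom_generate n → Spec_generate n (generate n)

-- ===== LEMMAS AND PROOFS =====

-- ---------- A side: the two-list deque behaves as a single-list queue ----------

-- reference loop over the logical single-list queue front ++ back.reverse
def pvLoop (n : Int) : Nat → List Int → List Int → List Int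
  | 0, _, acc => acc
  | _ + 1, [], acc => acc
  | fuel + 1, t :: q, acc =>
    let acc' := if pvP n t then acc ++ [t] else acc
    if PySem.Str.len (PySem.Int.toStr t) > 9 then acc'
    else pvLoop n fuel (q ++ [t * 10 + 7, t * 10 + 5, t * 10 + 3]) acc'

theorem pvLoop_cons (n : Int) (f : Nat) (t : Int) (q acc : List Int) :
    pvLoop n (f + 1) (t :: q) acc
      = (if PySem.Str.len (PySem.Int.toStr t) > 9 then (if pvP n t then acc ++ [t] else acc)
         else pvLoop n f (q ++ [t * 10 + 7, t * 10 + 5, t * 10 + 3])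
           (if pvP n t then acc ++ [t] else acc)) := rfl

-- popping from an empty front flips the back over
theorem pv_flip (n : Int) (f : Nat) (b : Int) (bs acc : List Int) :
    generateLoop n (f + 1) (([], b :: bs)) acc
      = generateLoop n (f + 1) (((b :: bs).reverse, [])) acc := by
  obtain ⟨t, rest, hr⟩ : ∃ t rest, (b :: bs).reverse = t :: rest := by
    cases h' : (b :: bs).reverse with
    | nil => exact absurd (congrArg List.length h') (by simp)
    | cons t rest => exact ⟨t, rest, rfl⟩
  have hp : pvPop ([], b :: bs) = some (t, rest, []) := by
    show (match (b :: bs).reverse with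
      | [] => none
      | t :: front => some (t, front, [])) = _
    rw [hr]
  show (match pvPop ([], b :: bs) with
    | none => acc
    | some (t, front, back) =>
      let acc' := if pvP n t then acc ++ [t] else acc
      if PySem.Str.len (PySem.Int.toStr t) > 9 then acc'
      else generateLoop n f ((front, (t * 10 + 3) :: (t * 10 + 5) :: (t * 10 + 7) :: back)) acc') = _
  rw [hp, hr]
  rfl

-- the port's queue (front, back) behaves as the single list front ++ back.reverse
theorem pv_twolist (n : Int) : ∀ (f : Nat) (front back acc : List Int),
    generateLoop n f ((front, back)) acc = pvLoop n f (front ++ back.reverse) acc := by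
  intro f
  induction f with
  | zero => intro front back acc; rfl
  | succ f ih =>
    have hcons : ∀ (t : Int) (front' back acc : List Int),
        generateLoop n (f + 1) ((t :: front', back)) acc
          = pvLoop n (f + 1) (t :: (front' ++ back.reverse)) acc := by
      intro t front' back acc
      show (if PySem.Str.len (PySem.Int.toStr t) > 9 then (if pvP n t then acc ++ [t] else acc)
        else generateLoop n f ((front', (t * 10 + 3) :: (t * 10 + 5) :: (t * 10 + 7) :: back))
          (if pvP n t then acc ++ [t] else acc)) = _
      rw [pvLoop_cons]
      by_cases hb : PySem.Str.len (PySem.Int.toStr t) > 9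
      · simp only [hb, if_true]
      · simp only [hb, if_false]
        rw [ih]
        congr 1
        simp
    intro front back acc
    match front with
    | t :: front' => exact hcons t front' back acc
    | [] =>
      match back with
      | [] => rfl
      | b :: bs =>
        rw [pv_flip]
        obtain ⟨t, rest, hr⟩ : ∃ t rest, (b :: bs).reverse = t :: rest := by
          cases h' : (b :: bs).reverse with
          | nil => exact absurd (congrArg List.length h') (by simp)
          | cons t rest => exact ⟨t, rest, rfl⟩
        rw [hr, hcons t rest [] acc]
        simp

-- ---------- A side: the BFS runs level by level ----------

-- children of a BFS level
def pvCh (xs : List Int) : List Int := xs.flatMap (fun x => [x * 10 + 7, x * 10 + 5, x * 10 + 3])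

-- the BFS levels: pvL k = the 3^k numbers with k digits drawn from {7,5,3} (for k ≥ 1)
def pvL : Nat → List Int
  | 0 => [0]
  | k + 1 => pvCh (pvL k)

-- fuel consumed by levels k .. k+m-1
def pvW : Nat → Nat → Nat
  | _, 0 => 0
  | k, m + 1 => (pvL k).length + pvW (k + 1) m

-- output contributed by levels k .. k+m-1
def pvG (n : Int) : Nat → Nat → List Int
  | _, 0 => []
  | k, m + 1 => (pvL k).filter (pvP n) ++ pvG n (k + 1) m

-- leftmost element of level k (7, 77, 777, …)
def pvH : Nat → Int
  | 0 => 0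
  | k + 1 => pvH k * 10 + 7

theorem pvCh_append (a b : List Int) : pvCh (a ++ b) = pvCh a ++ pvCh b := by
  simp [pvCh]

theorem pv_len_le (x : Int) (h0 : 0 ≤ x) (h : x < 10 ^ 9) :
    PySem.Str.len (PySem.Int.toStr x) ≤ 9 := by
  unfold PySem.Str.len PySem.Int.toStr PySem.Int.toChars
  rw [if_neg (by omega)]
  have hlt : x.toNat < 10 ^ 9 := by omega
  have := Nat.toDigits_length 10 x.toNat 9 (by norm_num) hlt
  simp only [String.toList_ofList]
  exact_mod_cast this

theorem pvL_bound : ∀ k, ∀ x ∈ pvL k, 0 ≤ x ∧ x < 10 ^ k := by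
  intro k
  induction k with
  | zero => simp [pvL]
  | succ k ih =>
    intro x hx
    simp only [pvL, pvCh, List.mem_flatMap] at hx
    obtain ⟨y, hy, hmem⟩ := hx
    obtain ⟨hy0, hyb⟩ := ih y hy
    have hcase : x = y * 10 + 7 ∨ x = y * 10 + 5 ∨ x = y * 10 + 3 := by
      simpa using hmem
    have h10 : (10:Int) ^ (k+1) = 10 ^ k * 10 := by ring
    rcases hcase with h | h | h <;> subst h <;> constructor <;> omega

theorem pvL_len : ∀ k, (pvL k).length = 3 ^ k := by
  intro k
  induction k with
  | zero => rfl
  | succ k ih => simp [pvL, pvCh, ih]; ring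

theorem pvL_head : ∀ k, ∃ t, pvL k = pvH k :: t := by
  intro k
  induction k with
  | zero => exact ⟨[], rfl⟩
  | succ k ih =>
    obtain ⟨t, ht⟩ := ih
    refine ⟨(pvH k * 10 + 5) :: (pvH k * 10 + 3) :: pvCh t, ?_⟩
    simp [pvL, ht, pvCh, pvH]

-- one whole level of A's loop: pop every element, filter it into the output, queue its children
theorem pv_step (n : Int) (l1 : List Int) :
    ∀ (f : Nat) (l0 acc : List Int),
      (∀ x ∈ l1, PySem.Str.len (PySem.Int.toStr x) ≤ 9) →
      pvLoop n (l1.length + f) (l1 ++ pvCh l0) acc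
        = pvLoop n f (pvCh (l0 ++ l1)) (acc ++ l1.filter (pvP n)) := by
  induction l1 with
  | nil => intro f l0 acc _; simp
  | cons x rest ih =>
    intro f l0 acc hlen
    have hx := hlen x (by simp)
    have hfuel : (x :: rest).length + f = (rest.length + f) + 1 := by simp; omega
    rw [hfuel]
    show (if PySem.Str.len (PySem.Int.toStr x) > 9 then _ else
      pvLoop n (rest.length + f) ((rest ++ pvCh l0) ++ [x * 10 + 7, x * 10 + 5, x * 10 + 3])
        (if pvP n x then acc ++ [x] else acc)) = _
    rw [if_neg (by omega)]
    have hq : (rest ++ pvCh l0) ++ [x * 10 + 7, x * 10 + 5, x * 10 + 3] = rest ++ pvCh (l0 ++ [x]) := by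
      rw [pvCh_append]; simp [pvCh]
    rw [hq, ih f (l0 ++ [x]) _ (fun y hy => hlen y (by simp [hy]))]
    congr 1
    · simp
    · rw [List.filter_cons]
      by_cases hp : pvP n x <;> simp [hp]

-- running levels k .. k+m-1 (all of digit length ≤ 9)
theorem pv_run (n : Int) : ∀ (m k : Nat) (acc : List Int) (f : Nat), k + m = 10 → 1 ≤ k →
    pvLoop n (pvW k m + f) (pvL k) acc
      = pvLoop n f (pvL 10) (acc ++ pvG n k m) := by
  intro m
  induction m with
  | zero =>
    intro k acc f hk _
    have : k = 10 := by omega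
    subst this
    simp [pvW, pvG]
  | succ m ih =>
    intro k acc f hk hk1
    have hlen : ∀ x ∈ pvL k, PySem.Str.len (PySem.Int.toStr x) ≤ 9 := by
      intro x hx
      obtain ⟨h0, hb⟩ := pvL_bound k x hx
      refine pv_len_le x h0 (lt_of_lt_of_le hb ?_)
      apply pow_le_pow_right₀ (by norm_num) (by omega)
    have e1 : pvW k (m+1) + f = (pvL k).length + (pvW (k+1) m + f) := by
      simp [pvW]; omega
    have hstep := pv_step n (pvL k) (pvW (k+1) m + f) [] acc hlen
    simp only [show pvCh [] = [] from rfl, List.append_nil, List.nil_append] at hstep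
    rw [e1, hstep]
    have e3 : pvCh (pvL k) = pvL (k+1) := rfl
    rw [e3, ih (k+1) _ f (by omega) (by omega)]
    simp [pvG, List.append_assoc]

-- the break: the first ten-digit number 7777777777 exceeds every n in the domain
theorem pv_final (n : Int) (hn : Dom_generate n) (acc : List Int) :
    pvLoop n 1 (pvL 10) acc = acc := by
  obtain ⟨t, ht⟩ := pvL_head 10
  have hh : pvH 10 = 7777777777 := by decide
  rw [ht, hh]
  have hp : pvP n 7777777777 = false := by
    have hd : decide ((7777777777:Int) ≤ n) = false := by
      apply decide_eq_false
      unfold Dom_generate pvDomInt at hn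
      simp at hn
      omega
    simp [pvP, hd]
  show (if PySem.Str.len (PySem.Int.toStr 7777777777) > 9 then
      (if pvP n 7777777777 then acc ++ [7777777777] else acc)
    else pvLoop n 0 (t ++ [7777777777 * 10 + 7, 7777777777 * 10 + 5, 7777777777 * 10 + 3])
      (if pvP n 7777777777 then acc ++ [7777777777] else acc)) = acc
  rw [hp, if_pos (by decide)]
  simp

-- A equals the level-by-level reference
theorem pv_A (n : Int) (hn : Dom_generate n) : generate n = pvG n 1 9 := by
  have h0 : generate n = pvLoop n 29524 (pvL 1) [] := by
    show generateLoop n 29525 ([0], []) [] = _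
    rw [pv_twolist]
    show pvLoop n 29525 [0] [] = _
    rw [show (29525 : Nat) = 29524 + 1 from rfl, pvLoop_cons]
    have hp : pvP n 0 = false := by
      simp only [pvP]
      rw [show PySem.Str.isIn "3" (PySem.Int.toStr 0) = false from by decide]
      simp
    rw [hp, if_neg (by decide)]
    simp only [Bool.false_eq_true, if_false]
    congr 1
  have hW : (29524 : Nat) = pvW 1 9 + 1 := by
    simp [pvW, pvL_len]
  rw [h0, hW, pv_run n 9 1 [] 1 (by omega) (by omega), pv_final n hn]
  simp

-- ---------- B side: base-3 unranking produces exactly the levels ----------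

-- decoded value of rank j at length L (digits least significant first)
def pvV : Nat → Nat → Nat
  | 0, _ => 0
  | L + 1, j => (7 - 2 * (j % 3)) + 10 * pvV L (j / 3)

-- the three presence flags of rank j at length L
def pvB7 : Nat → Nat → Bool
  | 0, _ => false
  | L + 1, j => (j % 3 == 0) || pvB7 L (j / 3)

def pvB5 : Nat → Nat → Bool
  | 0, _ => false
  | L + 1, j => (j % 3 == 1) || pvB5 L (j / 3)

def pvB3 : Nat → Nat → Bool
  | 0, _ => false
  | L + 1, j => (j % 3 == 2) || pvB3 L (j / 3)

-- the inner loop ignores its loop variable: it is pure iteration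
def pvIter : Nat → (Int × Int × Int × Bool × Bool × Bool) → Int × Int × Int × Bool × Bool × Bool
  | 0, s => s
  | L + 1, s => pvIter L (altStep s 0)

theorem pv_foldl_iter : ∀ (l : List Int) s, l.foldl altStep s = pvIter l.length s := by
  intro l
  induction l with
  | nil => intro s; rfl
  | cons a l ih =>
    intro s
    show l.foldl altStep (altStep s a) = pvIter (l.length + 1) s
    rw [ih]
    rfl

-- full evaluation of the decode loop
theorem pv_iter_eval : ∀ (L j : Nat) (x p : Int) (s7 s5 s3 : Bool),
    pvIter L (x, p, (j : Int), s7, s5, s3)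
      = (x + (pvV L j : Int) * p, p * 10 ^ L, ((j / 3 ^ L : Nat) : Int),
         s7 || pvB7 L j, s5 || pvB5 L j, s3 || pvB3 L j) := by
  intro L
  induction L with
  | zero => intro j x p s7 s5 s3; simp [pvIter, pvV, pvB7, pvB5, pvB3]
  | succ L ih =>
    intro j x p s7 s5 s3
    show pvIter L (altStep ((x, p, (j : Int), s7, s5, s3)) 0) = _
    have hstep : altStep ((x, p, (j : Int), s7, s5, s3)) 0
        = (x + (7 - 2 * ((j % 3 : Nat) : Int)) * p, p * 10, ((j / 3 : Nat) : Int),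
           s7 || (j % 3 == 0), s5 || (j % 3 == 1), s3 || (j % 3 == 2)) := by
      have hm : PySem.Int.mod (j : Int) 3 = ((j % 3 : Nat) : Int) := by
        exact_mod_cast PySem.Int.mod_natCast j 3
      have hf : PySem.Int.floordiv (j : Int) 3 = ((j / 3 : Nat) : Int) := by
        exact_mod_cast PySem.Int.floordiv_natCast j 3
      show (let t' := PySem.Int.floordiv (j : Int) 3
            let r := PySem.Int.mod (j : Int) 3
            let x' := x + (7 - 2 * r) * p
            let p' := p * 10
            if r = 0 then (x', p', t', true, s5, s3)
            else if r = 1 then (x', p', t', s7, true, s3)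
            else (x', p', t', s7, s5, true)) = _
      simp only [hm, hf]
      have h3 : j % 3 = 0 ∨ j % 3 = 1 ∨ j % 3 = 2 := by omega
      rcases h3 with h | h | h <;> rw [h] <;> simp
    rw [hstep, ih]
    refine Prod.ext ?_ (Prod.ext ?_ (Prod.ext ?_ (Prod.ext ?_ (Prod.ext ?_ ?_))))
    · have e : ((pvV (L + 1) j : Nat) : Int)
          = (7 - 2 * ((j % 3 : Nat) : Int)) + 10 * ((pvV L (j / 3) : Nat) : Int) := by
        simp only [pvV]
        omega
      show x + (7 - 2 * ((j % 3 : Nat) : Int)) * p + ((pvV L (j / 3) : Nat) : Int) * (p * 10)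
          = x + ((pvV (L + 1) j : Nat) : Int) * p
      rw [e]; ring
    · show p * 10 * 10 ^ L = p * 10 ^ (L + 1)
      rw [pow_succ]; ring
    · show ((j / 3 / 3 ^ L : Nat) : Int) = ((j / 3 ^ (L + 1) : Nat) : Int)
      rw [Nat.div_div_eq_div_mul, ← pow_succ']
    · show ((s7 || (j % 3 == 0)) || pvB7 L (j / 3)) = (s7 || pvB7 (L + 1) j)
      simp only [pvB7]; rw [Bool.or_assoc]
    · show ((s5 || (j % 3 == 1)) || pvB5 L (j / 3)) = (s5 || pvB5 (L + 1) j)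
      simp only [pvB5]; rw [Bool.or_assoc]
    · show ((s3 || (j % 3 == 2)) || pvB3 L (j / 3)) = (s3 || pvB3 (L + 1) j)
      simp only [pvB3]; rw [Bool.or_assoc]

-- the decoded value is positive for L ≥ 1
theorem pvV_pos (L j : Nat) : 0 < pvV (L + 1) j := by
  have : j % 3 ≤ 2 := by omega
  simp only [pvV]
  omega

-- one fuel step of Nat.toDigitsCore at base 10
theorem pv_tdc_step (f n : Nat) (acc : List Char) :
    Nat.toDigitsCore 10 (f + 1) n acc
      = if n / 10 = 0 then (n % 10).digitChar :: acc
        else Nat.toDigitsCore 10 f (n / 10) ((n % 10).digitChar :: acc) := by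
  simp [Nat.toDigitsCore]

-- accumulator lemma for Nat.toDigitsCore at base 10
theorem pv_tdc_acc (n : Nat) : ∀ (f : Nat) (acc : List Char), n < f →
    Nat.toDigitsCore 10 f n acc = Nat.toDigitsCore 10 (n + 1) n [] ++ acc := by
  induction n using Nat.strong_induction_on with
  | _ n ih =>
    intro f acc hf
    match f with
    | 0 => omega
    | f + 1 =>
      by_cases hx : n / 10 = 0
      · rw [pv_tdc_step, if_pos hx, pv_tdc_step, if_pos hx]
        rfl
      · have hn : 0 < n := by
          by_contra h
          simp [show n = 0 by omega] at hx
        have hlt : n / 10 < n := Nat.div_lt_self hn (by norm_num)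
        rw [pv_tdc_step, if_neg hx, pv_tdc_step, if_neg hx]
        rw [ih (n / 10) hlt f _ (by omega),
            ih (n / 10) hlt n _ (by omega)]
        simp

-- appending one decimal digit appends one character
theorem pv_toDigits_snoc (m d : Nat) (hm : 0 < m) (hd : d < 10) :
    Nat.toDigits 10 (m * 10 + d) = Nat.toDigits 10 m ++ [Nat.digitChar d] := by
  show Nat.toDigitsCore 10 (m * 10 + d + 1) (m * 10 + d) [] = _
  have hmod : (m * 10 + d) % 10 = d := by omega
  have hdiv : (m * 10 + d) / 10 = m := by omega
  rw [pv_tdc_step, hmod, hdiv, if_neg (by omega)]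
  rw [pv_tdc_acc m (m * 10 + d) [Nat.digitChar d] (by omega)]
  rfl

-- turning a propositional characterisation into an equation between Bools
theorem pv_decide_eq {P : Prop} [inst : Decidable P] (b : Bool) (h : P ↔ b = true) :
    decide P = b := by
  cases b
  · simp [h]
  · simp [h]

-- characters of the decoded value: membership of '7'/'5'/'3' is exactly the three flags
theorem pv_chars : ∀ (L j : Nat),
    (('7' ∈ PySem.Int.toChars ((pvV (L + 1) j : Nat) : Int)) ↔ pvB7 (L + 1) j = true) ∧
    (('5' ∈ PySem.Int.toChars ((pvV (L + 1) j : Nat) : Int)) ↔ pvB5 (L + 1) j = true) ∧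
    (('3' ∈ PySem.Int.toChars ((pvV (L + 1) j : Nat) : Int)) ↔ pvB3 (L + 1) j = true) := by
  intro L
  induction L with
  | zero =>
    intro j
    have h3 : j % 3 = 0 ∨ j % 3 = 1 ∨ j % 3 = 2 := by omega
    have hv : pvV 1 j = 7 - 2 * (j % 3) := by simp [pvV]
    rcases h3 with h | h | h <;>
      rw [hv, h] <;>
      simp only [pvB7, pvB5, pvB3, h] <;>
      norm_num <;>
      decide
  | succ L ih =>
    intro j
    have hpos := pvV_pos L (j / 3)
    have hmod : j % 3 ≤ 2 := by omega
    have hval : pvV (L + 2) j = pvV (L + 1) (j / 3) * 10 + (7 - 2 * (j % 3)) := by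
      simp only [pvV]; omega
    have hchars : PySem.Int.toChars ((pvV (L + 2) j : Nat) : Int)
        = PySem.Int.toChars ((pvV (L + 1) (j / 3) : Nat) : Int)
            ++ [Nat.digitChar (7 - 2 * (j % 3))] := by
      unfold PySem.Int.toChars
      rw [if_neg (by omega), if_neg (by omega)]
      simp only [Int.toNat_natCast]
      rw [hval]
      exact pv_toDigits_snoc _ _ hpos (by omega)
    obtain ⟨i7, i5, i3⟩ := ih (j / 3)
    have h3 : j % 3 = 0 ∨ j % 3 = 1 ∨ j % 3 = 2 := by omega
    refine ⟨?_, ?_, ?_⟩ <;>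
      rw [hchars] <;>
      simp only [List.mem_append, List.mem_singleton] <;>
      [rw [show (pvB7 (L + 1 + 1) j) = ((j % 3 == 0) || pvB7 (L + 1) (j / 3)) from rfl];
       rw [show (pvB5 (L + 1 + 1) j) = ((j % 3 == 1) || pvB5 (L + 1) (j / 3)) from rfl];
       rw [show (pvB3 (L + 1 + 1) j) = ((j % 3 == 2) || pvB3 (L + 1) (j / 3)) from rfl]] <;>
      rcases h3 with h | h | h <;>
      rw [h] <;>
      simp [i7, i5, i3, Nat.digitChar]
-- the A-side test, evaluated on a decoded value, is B's test
theorem pv_cond (n : Int) (L j : Nat) :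
    pvP n ((pvV (L + 1) j : Nat) : Int)
      = (decide (((pvV (L + 1) j : Nat) : Int) ≤ n) &&
         (pvB7 (L + 1) j && (pvB5 (L + 1) j && pvB3 (L + 1) j))) := by
  obtain ⟨i7, i5, i3⟩ := pv_chars L j
  have key : ∀ (c : Char) (sub : String), sub.toList = [c] → ∀ (x : Int),
      PySem.Str.isIn sub (PySem.Int.toStr x) = decide (c ∈ PySem.Int.toChars x) := by
    intro c sub hs x
    by_cases h : c ∈ PySem.Int.toChars x
    · rw [decide_eq_true h, PySem.Str.isIn_iff_infix, hs, PySem.Int.toList_toStr,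
          List.singleton_infix_iff]
      exact h
    · rw [decide_eq_false h, ← Bool.not_eq_true, PySem.Str.isIn_iff_infix, hs,
          PySem.Int.toList_toStr, List.singleton_infix_iff]
      exact h
  unfold pvP
  rw [key '3' "3" rfl, key '7' "7" rfl, key '5' "5" rfl,
      pv_decide_eq _ i3, pv_decide_eq _ i7, pv_decide_eq _ i5]
  cases pvB7 (L + 1) j <;> cases pvB5 (L + 1) j <;> cases pvB3 (L + 1) j <;>
    cases hd : decide (((pvV (L + 1) j : Nat) : Int) ≤ n) <;> simp

-- ranks 0 .. 3^L-1 decode, in order, to exactly the BFS level pvL L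
theorem pv_range_mul (m : Nat) (f : Nat → Int) :
    (List.range (3 * m)).map f
      = (List.range m).flatMap (fun q => [f (3 * q), f (3 * q + 1), f (3 * q + 2)]) := by
  induction m with
  | zero => rfl
  | succ m ih =>
    rw [show 3 * (m + 1) = 3 * m + 1 + 1 + 1 by ring]
    rw [List.range_succ, List.range_succ, List.range_succ, List.range_succ]
    simp only [List.map_append, List.flatMap_append, ih]
    simp

theorem pv_level : ∀ L : Nat, (List.range (3 ^ L)).map (fun j => ((pvV L j : Nat) : Int)) = pvL L := by
  intro L
  induction L with
  | zero => simp [pvV, pvL]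
  | succ L ih =>
    rw [pow_succ, mul_comm, pv_range_mul]
    show _ = pvCh (pvL L)
    rw [← ih]
    simp only [pvCh, List.flatMap_map]
    refine List.flatMap_congr (fun q hq => ?_)
    have e : ∀ r : Nat, r < 3 →
        ((pvV (L + 1) (3 * q + r) : Nat) : Int)
          = ((pvV L q : Nat) : Int) * 10 + ((7 - 2 * r : Nat) : Int) := by
      intro r hr
      have h1 : (3 * q + r) % 3 = r := by omega
      have h2 : (3 * q + r) / 3 = q := by omega
      simp only [pvV, h1, h2]
      omega
    have e0 := e 0 (by omega)
    have e1 := e 1 (by omega)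
    have e2 := e 2 (by omega)
    norm_num at e0 e1 e2
    rw [e0, e1, e2]

-- converting B's append-if fold into a filter over the decoded level
theorem pv_fold_filter (n : Int) (K : Nat) (ls : List Int) (hlen : ls.length = K + 1) :
    ∀ (l : List Nat) (res : List Int),
    l.foldl (fun res j =>
        match ls.foldl altStep (0, 1, ((j : Nat) : Int), false, false, false) with
        | (x, _, _, s7, s5, s3) =>
          if x ≤ n ∧ s7 ∧ s5 ∧ s3 then res ++ [x] else res) res
      = res ++ (l.map (fun j => ((pvV (K + 1) j : Nat) : Int))).filter (pvP n) := by
  have hfold : ∀ (j : Nat),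
      ls.foldl altStep (0, 1, ((j : Nat) : Int), false, false, false)
        = (((pvV (K + 1) j : Nat) : Int), 10 ^ (K + 1), ((j / 3 ^ (K + 1) : Nat) : Int),
           pvB7 (K + 1) j, pvB5 (K + 1) j, pvB3 (K + 1) j) := by
    intro j
    rw [pv_foldl_iter, hlen, pv_iter_eval]
    norm_num
  intro l
  induction l with
  | nil => intro res; simp
  | cons j l ih =>
    intro res
    simp only [List.foldl_cons, List.map_cons, List.filter_cons, hfold] at ih ⊢
    by_cases h : (((pvV (K + 1) j : Nat) : Int) ≤ n ∧ pvB7 (K + 1) j = true ∧ pvB5 (K + 1) j = true ∧ pvB3 (K + 1) j = true)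
    · have hp : pvP n ((pvV (K + 1) j : Nat) : Int) = true := by
        rw [pv_cond n K j]
        obtain ⟨h1, h2, h3, h4⟩ := h
        simp [h1, h2, h3, h4]
      rw [if_pos h, hp, ih]
      simp
    · have hp : pvP n ((pvV (K + 1) j : Nat) : Int) = false := by
        rw [pv_cond n K j]
        by_contra hc
        apply h
        simp only [Bool.not_eq_false, Bool.and_eq_true, decide_eq_true_eq] at hc
        exact ⟨hc.1, hc.2.1, hc.2.2.1, hc.2.2.2⟩
      rw [if_neg h, hp, ih]
      simp

-- one level of B's outer loop appends exactly that level's filtered output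
theorem pv_level_B (n : Int) (L : Int) (hL : 1 ≤ L) (res : List Int) :
    (PySem.List.pyRange 0 ((3 : Int) ^ L.toNat) 1).foldl (fun res k =>
      match (PySem.List.pyRange 0 L 1).foldl altStep (0, 1, k, false, false, false) with
      | (x, _, _, s7, s5, s3) =>
        if x ≤ n ∧ s7 ∧ s5 ∧ s3 then res ++ [x] else res) res
      = res ++ (pvL L.toNat).filter (pvP n) := by
  obtain ⟨K, hK⟩ : ∃ K : Nat, L.toNat = K + 1 := ⟨L.toNat - 1, by omega⟩
  have hlen : (PySem.List.pyRange 0 L 1).length = K + 1 := by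
    rw [PySem.List.length_pyRange_one]
    omega
  have hbound : ((3 : Int) ^ L.toNat) = ((3 ^ L.toNat : Nat) : Int) := by push_cast; ring
  rw [hbound, PySem.List.pyRange_zero_natCast, List.foldl_map]
  rw [pv_fold_filter n K _ hlen, ← hK, hK, pv_level (K + 1), ← hK]

-- running B's outer loop from level a to 9
theorem pv_outer (n : Int) : ∀ (m : Nat) (a : Int), a + m = 10 → 1 ≤ a → ∀ res : List Int,
    (PySem.List.pyRange a 10 1).foldl (fun res L =>
      (PySem.List.pyRange 0 ((3 : Int) ^ L.toNat) 1).foldl (fun res k =>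
        match (PySem.List.pyRange 0 L 1).foldl altStep (0, 1, k, false, false, false) with
        | (x, _, _, s7, s5, s3) =>
          if x ≤ n ∧ s7 ∧ s5 ∧ s3 then res ++ [x] else res) res) res
      = res ++ pvG n a.toNat m := by
  intro m
  induction m with
  | zero =>
    intro a ha h1 res
    rw [PySem.List.pyRange_one_eq_nil (by omega)]
    simp [pvG]
  | succ m ih =>
    intro a ha h1 res
    rw [PySem.List.pyRange_one_cons (by omega)]
    rw [List.foldl_cons]
    rw [pv_level_B n a h1 res]
    rw [ih (a + 1) (by omega) (by omega)]
    have he : (a + 1).toNat = a.toNat + 1 := by omega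
    have hg : pvG n a.toNat (m + 1) = (pvL a.toNat).filter (pvP n) ++ pvG n (a.toNat + 1) m := rfl
    rw [he, hg, List.append_assoc]

-- B equals the level-by-level reference
theorem pv_B (n : Int) : generate_alt n = pvG n 1 9 := by
  unfold generate_alt
  rw [pv_outer n 9 1 (by omega) (by omega) []]
  rfl

-- ===== VERDICT (by name: the statement is the Claim_ definition above) =====
theorem generate_spec : Claim_equal_generate := by
  intro n hn
  unfold Spec_generate
  rw [pv_A n hn, pv_B n]
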